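-- pv_equiv track=rewrite | github.com/shivanshu603/project1 | ai_agent/seo/advanced_seo_helper_new.py | _cluster_keywords
-- ===== SOURCE A (Python) =====
-- from typing import Dict, List, Set, Tuple, Optional, Any
--
-- def _cluster_keywords(keywords: List[str]) -> Dict[str, List[str]]:
--     """Cluster keywords into related groups"""
--     clusters = {}
--
--     # Simple clustering based on common words
--     for keyword in keywords:
--         words = set(keyword.lower().split())
--
--         # Find the most relevant cluster
--         best_cluster = None
--         best_overlap = 0
--
--         for cluster_name, cluster_keywords in clusters.items():
--             cluster_words = set(cluster_name.lower().split())
--             overlap = len(words.intersection(cluster_words))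
--
--             if overlap > best_overlap:
--                 best_overlap = overlap
--                 best_cluster = cluster_name
--
--         # Add to existing cluster or create new one
--         if best_overlap >= 1:  # At least one word in common
--             clusters[best_cluster].append(keyword)
--         else:
--             clusters[keyword] = [keyword]
--
--     return clusters
-- ===== SOURCE B (Python) =====
-- from typing import Dict, List
--
-- def _cluster_keywords(keywords: List[str]) -> Dict[str, List[str]]:
--     """Cluster keywords into related groups (inverted-index implementation)."""
--     clusters: Dict[str, List[str]] = {}
--     index: Dict[str, List[str]] = {}  # word -> cluster names whose name contains that word
--
--     for keyword in keywords:
--         words = set(keyword.lower().split())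
--
--         # Tally shared-word counts only for clusters that actually share a word.
--         counts: Dict[str, int] = {}
--         for w in words:
--             for name in index.get(w, ()):
--                 counts[name] = counts.get(name, 0) + 1
--
--         if counts:
--             # First cluster (in insertion order) with the maximal shared-word count.
--             best = max(clusters, key=lambda n: counts.get(n, 0))
--             clusters[best].append(keyword)
--         else:
--             clusters[keyword] = [keyword]
--             for w in words:
--                 index.setdefault(w, []).append(keyword)
--
--     return clusters
-- ===== Notes on version B (the rewrite author's own statement) =====
-- stated objective: faster
-- what changed: B maintains an inverted index word->cluster names and tallies shared-word counts only for clusters that actually share a word, replacing A's per-keyword recomputation and intersection of every cluster's word set; the best cluster is then picked by a max over counts with A's first-in-insertion-order tie-break.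
import Mathlib
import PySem

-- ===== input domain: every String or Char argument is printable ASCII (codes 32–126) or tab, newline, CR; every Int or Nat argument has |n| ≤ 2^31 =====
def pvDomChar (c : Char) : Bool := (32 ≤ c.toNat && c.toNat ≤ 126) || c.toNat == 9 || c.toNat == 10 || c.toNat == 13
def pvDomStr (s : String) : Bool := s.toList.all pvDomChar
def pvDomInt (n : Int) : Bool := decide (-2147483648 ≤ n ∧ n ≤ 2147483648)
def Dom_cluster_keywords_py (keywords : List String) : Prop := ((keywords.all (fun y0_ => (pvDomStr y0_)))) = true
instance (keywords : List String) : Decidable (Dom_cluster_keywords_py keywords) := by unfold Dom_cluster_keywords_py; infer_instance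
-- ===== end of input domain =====

-- B replaces A's per-keyword scan that intersects word-sets with every cluster by a
-- maintained inverted index word → cluster names, tallying shared-word counts only for
-- clusters that actually share a word (objective: faster).

-- shared helper: set(keyword.lower().split()) — the same line occurs in both Pythons
def pvWords (s : String) : PySem.Set String :=
  PySem.Set.ofList (PySem.Str.split₀ (PySem.Str.lower s))

-- ===== PORT A =====
def pvStepA (clusters : PySem.Dict String (List String)) (keyword : String) :
    PySem.Dict String (List String) :=
  let words := pvWords keyword
  -- for cluster_name, _ in clusters.items(): overlap = len(words & set(name.lower().split()))
  let sel := clusters.items.foldl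
    (fun (best : Option String × Nat) item =>
      let cw := pvWords item.1
      let overlap := (PySem.Set.inter words cw).length
      if overlap > best.2 then (some item.1, overlap) else best)
    (none, 0)
  if sel.2 ≥ 1 then
    match sel.1 with
    | some name => clusters.modify name [] (fun members => members ++ [keyword])
    | none => clusters   -- unreachable: best_overlap ≥ 1 forces best_cluster ≠ None
  else
    clusters.insert keyword [keyword]

def cluster_keywords_py (keywords : List String) : List (String × List String) :=
  (keywords.foldl pvStepA PySem.Dict.empty).items

-- ===== PORT B =====
def pvStepB (st : PySem.Dict String (List String) × PySem.Dict String (List String))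
    (keyword : String) :
    PySem.Dict String (List String) × PySem.Dict String (List String) :=
  let clusters := st.1
  let index := st.2
  let words := pvWords keyword
  -- counts[name] = counts.get(name, 0) + 1 for each name in index.get(w, ())
  let counts : PySem.Dict String Nat :=
    words.foldl
      (fun c w => (index.getD w []).foldl (fun c name => c.modify name 0 (· + 1)) c)
      PySem.Dict.empty
  if counts.size ≠ 0 then
    -- best = max(clusters, key=lambda n: counts.get(n, 0))
    match PySem.List.max? clusters.keys (fun n => counts.getD n 0) with
    | some best => (clusters.modify best [] (fun members => members ++ [keyword]), index)
    | none => (clusters, index)   -- unreachable: counts ≠ {} forces clusters ≠ {}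
  else
    (clusters.insert keyword [keyword],
     words.foldl (fun idx w => idx.modify w [] (fun l => l ++ [keyword])) index)

def cluster_keywords_py_alt (keywords : List String) : List (String × List String) :=
  (keywords.foldl pvStepB (PySem.Dict.empty, PySem.Dict.empty)).1.items

-- ===== PRECONDITION & SPEC =====
def Spec_cluster_keywords_py (keywords : List String) (out : List (String × List String)) : Prop := out = cluster_keywords_py_alt keywords
instance (keywords : List String) (out : List (String × List String)) : Decidable (Spec_cluster_keywords_py keywords out) := by unfold Spec_cluster_keywords_py; infer_instance

-- ===== CLAIM (what is proved, stated in full; the proofs are below) =====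
def Claim_equal_cluster_keywords_py : Prop := ∀ (keywords : List String), Dom_cluster_keywords_py keywords → Spec_cluster_keywords_py keywords (cluster_keywords_py keywords)

-- ===== LEMMAS AND PROOFS =====

-- the invariant: index.get(w, []) lists, once each, exactly the cluster names containing word w
def pvInv (clusters index : PySem.Dict String (List String)) : Prop :=
  ∀ w name, (index.getD w []).count name
    = (if name ∈ clusters.keys ∧ w ∈ pvWords name then 1 else 0)


-- counts.get(name, 0) after the tally loop
theorem pvCounts_getD (words : List String) (index : PySem.Dict String (List String))
    (c0 : PySem.Dict String Nat) (name : String) :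
    (words.foldl
      (fun c w => (index.getD w []).foldl (fun c n => c.modify n 0 (· + 1)) c) c0).getD name 0
    = c0.getD name 0 + (words.map (fun w => (index.getD w []).count name)).sum := by
  induction words generalizing c0 with
  | nil => simp
  | cons w ws ih =>
    simp only [List.foldl_cons, List.map_cons, List.sum_cons]
    rw [ih, PySem.Dict.getD_foldl_modify_add_one_nat]
    omega

-- keys of the tally dict
theorem pvCounts_keys (words : List String) (index : PySem.Dict String (List String))
    (c0 : PySem.Dict String Nat) :
    (words.foldl
      (fun c w => (index.getD w []).foldl (fun c n => c.modify n 0 (· + 1)) c) c0).keys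
    = PySem.Set.update c0.keys (words.flatMap (fun w => index.getD w [])) := by
  induction words generalizing c0 with
  | nil => simp [PySem.Set.update_nil]
  | cons w ws ih =>
    simp only [List.foldl_cons, List.flatMap_cons]
    rw [ih, PySem.Set.update_append, PySem.Dict.keys_foldl_modify]

-- a 0/1-indicator sum is a filter length
theorem pvSumIndicator (l : List String) (p : String → Bool) :
    (l.map (fun w => if p w then (1 : Nat) else 0)).sum = (l.filter p).length := by
  induction l with
  | nil => rfl
  | cons x xs ih =>
    by_cases h : p x <;> simp [h, ih]
    omega

-- max? only looks at the key values of members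
theorem pvMaxFold_congr {α κ : Type} [LT κ] [DecidableLT κ] (l : List α) (k1 k2 : α → κ)
    (h : ∀ x ∈ l, k1 x = k2 x) :
    ∀ acc : Option α, (∀ a, acc = some a → k1 a = k2 a) →
    l.foldl (fun acc x => match acc with
      | none => some x | some m => if k1 m < k1 x then some x else some m) acc
    = l.foldl (fun acc x => match acc with
      | none => some x | some m => if k2 m < k2 x then some x else some m) acc := by
  induction l with
  | nil => intro acc _; rfl
  | cons x xs ih =>
    intro acc hacc
    have hx : k1 x = k2 x := h x (by simp)
    have htl : ∀ y ∈ xs, k1 y = k2 y := fun y hy => h y (List.mem_cons_of_mem _ hy)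
    simp only [List.foldl_cons]
    cases acc with
    | none =>
      exact ih htl (some x) (fun a ha => by cases ha; exact hx)
    | some m =>
      have hm : k1 m = k2 m := hacc m rfl
      simp only [hm, hx]
      split
      · exact ih htl (some x) (fun a ha => by cases ha; exact hx)
      · exact ih htl (some m) (fun a ha => by cases ha; exact hm)

theorem pvMax?_key_congr {α κ : Type} [LT κ] [DecidableLT κ] (l : List α) (k1 k2 : α → κ)
    (h : ∀ x ∈ l, k1 x = k2 x) : PySem.List.max? l k1 = PySem.List.max? l k2 := by
  unfold PySem.List.max?
  exact pvMaxFold_congr l k1 k2 h none (fun a ha => by cases ha)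

-- characterisation of A's selection fold
theorem pvSelA (l : List (String × List String)) (g : String → Nat) :
    (l.foldl (fun (best : Option String × Nat) item =>
        if g item.1 > best.2 then (some item.1, g item.1) else best) (none, 0)
      = (none, 0) ∧ ∀ n ∈ l.map (·.1), g n = 0)
    ∨ (∃ m, PySem.List.max? (l.map (·.1)) g = some m ∧ 1 ≤ g m ∧
        l.foldl (fun (best : Option String × Nat) item =>
          if g item.1 > best.2 then (some item.1, g item.1) else best) (none, 0)
        = (some m, g m)) := by
  induction l using List.reverseRecOn with
  | nil => left; simp
  | append_singleton l x ih =>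
    rw [List.foldl_append, List.map_append]
    rcases ih with ⟨hfold, hzero⟩ | ⟨m, hmax, hg, hfold⟩
    · rw [hfold]
      by_cases hx : 1 ≤ g x.1
      · right
        refine ⟨x.1, ?_, hx, ?_⟩
        · unfold PySem.List.max?
          rw [List.foldl_append]
          rcases hcase : PySem.List.max? (l.map (·.1)) g with _ | m0
          · unfold PySem.List.max? at hcase
            rw [hcase]; rfl
          · have hm0 : m0 ∈ l.map (·.1) := PySem.List.max?_mem hcase
            have hz : g m0 = 0 := hzero m0 hm0
            unfold PySem.List.max? at hcase
            rw [hcase]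
            simp only [List.map_cons, List.map_nil, List.foldl_cons, List.foldl_nil]
            rw [if_pos (by omega)]
        · simp only [List.foldl_cons, List.foldl_nil]
          rw [if_pos (by omega)]
      · left
        constructor
        · simp only [List.foldl_cons, List.foldl_nil]
          rw [if_neg (by omega)]
        · intro n hn
          rcases List.mem_append.mp hn with h' | h'
          · exact hzero n h'
          · simp only [List.map_cons, List.map_nil, List.mem_singleton] at h'
            subst h'; omega
    · right
      rw [hfold]
      unfold PySem.List.max?
      rw [List.foldl_append]
      have hmax' := hmax
      unfold PySem.List.max? at hmax'
      rw [hmax']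
      simp only [List.map_cons, List.map_nil, List.foldl_cons, List.foldl_nil]
      by_cases hcmp : g m < g x.1
      · exact ⟨x.1, by rw [if_pos hcmp], by omega, by rw [if_pos (by omega)]⟩
      · exact ⟨m, by rw [if_neg hcmp], hg, by rw [if_neg (by omega)]⟩

-- the index after registering a new cluster name under each of its words
theorem pvIdx_getD (ws : List String) (kw : String) (idx : PySem.Dict String (List String))
    (hnd : ws.Nodup) (w : String) :
    (ws.foldl (fun idx w => idx.modify w [] (fun l => l ++ [kw])) idx).getD w []
    = idx.getD w [] ++ (if w ∈ ws then [kw] else []) := by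
  induction ws generalizing idx with
  | nil => simp
  | cons w0 rest ih =>
    rw [List.nodup_cons] at hnd
    simp only [List.foldl_cons]
    rw [ih (idx.modify w0 [] (fun l => l ++ [kw])) hnd.2, PySem.Dict.getD_modify]
    by_cases hw : w = w0
    · subst hw
      simp [hnd.1]
    · simp [hw]

-- one step of A equals one step of B (first component), and the invariant is maintained
theorem pvStep_eq (clusters index : PySem.Dict String (List String)) (keyword : String)
    (hN : clusters.keys.Nodup) (hInv : pvInv clusters index) :
    (pvStepB (clusters, index) keyword).1 = pvStepA clusters keyword
    ∧ (pvStepA clusters keyword).keys.Nodup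
    ∧ pvInv (pvStepA clusters keyword) (pvStepB (clusters, index) keyword).2 := by
  have hwnd : (pvWords keyword).Nodup := PySem.Set.nodup_ofList _
  -- the overlap A computes, and B's tally dict
  set W : List String := pvWords keyword with hW
  set g : String → Nat := fun n => (PySem.Set.inter W (pvWords n)).length with hg
  set counts : PySem.Dict String Nat :=
    W.foldl (fun c w => (index.getD w []).foldl (fun c n => c.modify n 0 (· + 1)) c)
      PySem.Dict.empty with hcounts
  -- B's counts.get(n, 0) agrees with A's overlap on cluster names
  have hF2 : ∀ n ∈ clusters.keys, counts.getD n 0 = g n := by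
    intro n hn
    rw [hcounts, pvCounts_getD]
    have hmap : ∀ w ∈ W, (index.getD w []).count n
        = (if (pvWords n).contains w then (1 : Nat) else 0) := by
      intro w _
      rw [hInv w n]
      by_cases hc : (pvWords n).contains w
      · rw [if_pos hc, if_pos ⟨hn, (PySem.Set.contains_iff _ _).mp hc⟩]
      · rw [if_neg hc, if_neg]
        rintro ⟨-, hmem⟩
        exact hc ((PySem.Set.contains_iff _ _).mpr hmem)
    rw [List.map_congr_left hmap, pvSumIndicator, PySem.Dict.getD_empty]
    simp only [Nat.zero_add, hg]
    rfl
  -- B's emptiness test agrees with "some cluster shares a word"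
  have hF3 : counts.size ≠ 0 ↔ ∃ n ∈ clusters.keys, 1 ≤ g n := by
    have hkeys : counts.keys
        = PySem.Set.ofList (W.flatMap (fun w => index.getD w [])) := by
      rw [hcounts, pvCounts_keys, PySem.Dict.keys_empty]
      exact PySem.Set.update_empty _
    have hsize : counts.size = counts.keys.length := by
      simp [PySem.Dict.size, PySem.Dict.keys]
    constructor
    · intro hne
      have : counts.keys ≠ [] := by
        intro h; rw [h] at hsize; simp at hsize; exact hne hsize
      rw [hkeys] at this
      have hfl : W.flatMap (fun w => index.getD w []) ≠ [] := by
        intro h; rw [h] at this; exact this rfl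
      rw [Ne, List.flatMap_eq_nil_iff] at hfl
      push Not at hfl
      obtain ⟨w, hwW, hwne⟩ := hfl
      obtain ⟨n, hn⟩ := List.exists_mem_of_ne_nil _ hwne
      have hcnt : 0 < (index.getD w []).count n := List.count_pos_iff.mpr hn
      rw [hInv w n] at hcnt
      by_cases hcond : n ∈ clusters.keys ∧ w ∈ pvWords n
      · refine ⟨n, hcond.1, ?_⟩
        have : w ∈ PySem.Set.inter W (pvWords n) := by
          exact List.mem_filter.mpr ⟨hwW, (PySem.Set.contains_iff _ _).mpr hcond.2⟩
        have := List.length_pos_of_mem this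
        simpa [hg] using this
      · rw [if_neg hcond] at hcnt; omega
    · rintro ⟨n, hn, hgn⟩
      have hinter : PySem.Set.inter W (pvWords n) ≠ [] := by
        intro h
        rw [hg] at hgn; simp only at hgn
        rw [h] at hgn; simp at hgn
      obtain ⟨w, hw⟩ := List.exists_mem_of_ne_nil _ hinter
      have hw' := List.mem_filter.mp hw
      have hwpn : w ∈ pvWords n := (PySem.Set.contains_iff _ _).mp hw'.2
      have hcnt : (index.getD w []).count n = 1 := by
        rw [hInv w n, if_pos ⟨hn, hwpn⟩]
      have hnmem : n ∈ index.getD w [] := by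
        rw [← List.count_pos_iff, hcnt]; omega
      have hne : index.getD w [] ≠ [] := List.ne_nil_of_mem hnmem
      intro hsz
      have : counts.keys = [] := by
        rw [hsize] at hsz
        exact List.eq_nil_of_length_eq_zero hsz
      rw [hkeys] at this
      have : W.flatMap (fun w => index.getD w []) = [] := by
        rcases hfl : W.flatMap (fun w => index.getD w []) with _ | ⟨a, as⟩
        · rfl
        · rw [hfl, PySem.Set.ofList_cons] at this; simp at this
      rw [List.flatMap_eq_nil_iff] at this
      exact hne (this w hw'.1)
  have hkeys_eq : clusters.keys = clusters.items.map (·.1) := rfl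
  by_cases hpos : ∃ n ∈ clusters.keys, 1 ≤ g n
  · -- some cluster shares a word: both sides append to the same best cluster
    have hsz : counts.size ≠ 0 := hF3.mpr hpos
    rcases pvSelA clusters.items g with ⟨hfold, hzero⟩ | ⟨m, hmax, hgm, hfold⟩
    · exfalso
      obtain ⟨n, hn, hgn⟩ := hpos
      rw [hkeys_eq] at hn
      have := hzero n hn
      omega
    · have hmKeys : m ∈ clusters.keys := by
        rw [hkeys_eq]; exact PySem.List.max?_mem hmax
      have hmaxB : PySem.List.max? clusters.keys (fun n => counts.getD n 0) = some m := by
        rw [pvMax?_key_congr clusters.keys (fun n => counts.getD n 0) g hF2]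
        rw [hkeys_eq]; exact hmax
      have hA : pvStepA clusters keyword
          = clusters.modify m [] (fun members => members ++ [keyword]) := by
        dsimp only [pvStepA]
        rw [← hW]
        simp only [hg] at hfold
        rw [hfold]
        simp only
        rw [if_pos (by omega : (g m) ≥ 1)]
      have hB : pvStepB (clusters, index) keyword
          = (clusters.modify m [] (fun members => members ++ [keyword]), index) := by
        dsimp only [pvStepB]
        rw [← hW, ← hcounts, if_pos hsz, hmaxB]
      have hkeysA : (pvStepA clusters keyword).keys = clusters.keys := by
        rw [hA, PySem.Dict.keys_modify,
          PySem.Dict.keys_insert_of_contains _ _ ((PySem.Dict.contains_iff_mem_keys _ _).mpr hmKeys)]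
      refine ⟨by rw [hA, hB], by rw [hkeysA]; exact hN, ?_⟩
      intro w n
      rw [hB]
      simp only
      rw [hkeysA]
      exact hInv w n
  · -- no cluster shares a word: both sides open a new cluster
    have hsz : ¬ counts.size ≠ 0 := fun h => hpos (hF3.mp h)
    rcases pvSelA clusters.items g with ⟨hfold, hzero⟩ | ⟨m, hmax, hgm, hfold⟩
    · have hA : pvStepA clusters keyword = clusters.insert keyword [keyword] := by
        dsimp only [pvStepA]
        rw [← hW]
        simp only [hg] at hfold
        rw [hfold]
        simp only
        rw [if_neg (by omega : ¬ ((0 : Nat) ≥ 1))]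
      have hB : pvStepB (clusters, index) keyword
          = (clusters.insert keyword [keyword],
             W.foldl (fun idx w => idx.modify w [] (fun l => l ++ [keyword])) index) := by
        dsimp only [pvStepB]
        rw [← hW, ← hcounts, if_neg hsz]
      refine ⟨by rw [hA, hB], by rw [hA]; exact PySem.Dict.nodup_keys_insert _ _ _ hN, ?_⟩
      intro w n
      rw [hA, hB]
      simp only
      rw [pvIdx_getD W keyword index hwnd w, List.count_append]
      have hmemk : n ∈ (clusters.insert keyword [keyword]).keys ↔ n = keyword ∨ n ∈ clusters.keys :=
        PySem.Dict.mem_keys_insert _ _ _ _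
      by_cases hnk : n = keyword
      · subst hnk
        by_cases hkin : n ∈ clusters.keys
        · -- the keyword already names a cluster: then it has no words at all
          have hWnil : W = [] := by
            have hg0 : g n = 0 := by
              by_contra h
              exact hpos ⟨n, hkin, by omega⟩
            rw [hg] at hg0
            simp only at hg0
            have : PySem.Set.inter W (pvWords n) = W := by
              rw [← hW]
              apply List.filter_eq_self.mpr
              intro a ha
              rw [hW] at ha
              exact (PySem.Set.contains_iff _ _).mpr ha
            rw [this] at hg0
            exact List.eq_nil_of_length_eq_zero hg0
          rw [hWnil]
          simp only [List.not_mem_nil, if_neg (fun h => h : ¬ False)]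
          rw [hInv w n]
          have hpw : pvWords n = [] := by rw [← hW, hWnil]
          rw [hpw]
          simp
        · have h0 : (index.getD w []).count n = 0 := by
            rw [hInv w n, if_neg]
            rintro ⟨h, -⟩
            exact hkin h
          rw [h0]
          by_cases hwW : w ∈ W
          · rw [if_pos hwW]
            have : n ∈ (clusters.insert n [n]).keys := (hmemk).mpr (Or.inl rfl)
            rw [if_pos ⟨this, by rw [← hW]; exact hwW⟩]
            simp
          · rw [if_neg hwW]
            rw [if_neg]
            · simp
            · rintro ⟨-, hmem⟩
              rw [← hW] at hmem
              exact hwW hmem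
      · have : (if w ∈ W then [keyword] else []).count n = 0 := by
          apply List.count_eq_zero.mpr
          intro hmem
          by_cases hwW : w ∈ W
          · rw [if_pos hwW] at hmem
            exact hnk (List.mem_singleton.mp hmem)
          · rw [if_neg hwW] at hmem
            exact List.not_mem_nil hmem
        rw [this, hInv w n]
        by_cases hcond : n ∈ clusters.keys ∧ w ∈ pvWords n
        · rw [if_pos hcond, if_pos ⟨hmemk.mpr (Or.inr hcond.1), hcond.2⟩]
        · rw [if_neg hcond, if_neg]
          rintro ⟨hk, hw2⟩
          rcases hmemk.mp hk with h | h
          · exact hnk h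
          · exact hcond ⟨h, hw2⟩
    · exfalso
      apply hpos
      refine ⟨m, ?_, hgm⟩
      rw [hkeys_eq]
      exact PySem.List.max?_mem hmax

theorem pvFold_eq (keywords : List String) (clusters index : PySem.Dict String (List String))
    (hN : clusters.keys.Nodup) (hInv : pvInv clusters index) :
    (keywords.foldl pvStepB (clusters, index)).1 = keywords.foldl pvStepA clusters := by
  induction keywords generalizing clusters index with
  | nil => rfl
  | cons k rest ih =>
    obtain ⟨h1, h2, h3⟩ := pvStep_eq clusters index k hN hInv
    simp only [List.foldl_cons]
    rcases hst : pvStepB (clusters, index) k with ⟨c', i'⟩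
    rw [hst] at h1 h3
    simp only at h1 h3
    rw [h1]
    exact ih _ _ (h1 ▸ h2) h3

-- ===== VERDICT (by name: the statement is the Claim_ definition above) =====
theorem cluster_keywords_py_spec : Claim_equal_cluster_keywords_py := by
  intro keywords _
  unfold Spec_cluster_keywords_py cluster_keywords_py cluster_keywords_py_alt
  rw [pvFold_eq keywords PySem.Dict.empty PySem.Dict.empty
    (by rw [PySem.Dict.keys_empty]; exact List.nodup_nil)
    (by intro w n
        rw [PySem.Dict.getD_empty, PySem.Dict.keys_empty]
        simp)]
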